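-- pv_equiv track=rewrite | github.com/codesearchvuln/codesearchvuln | backend/tests/test_release_offline_up.py | _assert_command_sequence
-- ===== SOURCE A (Python) =====
-- def _command_index(commands: list[str], expected: str, *, start: int = 0) -> int:
--     for index in range(start, len(commands)):
--         if commands[index] == expected:
--             return index
--     raise AssertionError(f"expected command {expected!r} in order, got {commands!r}")
--
-- def _assert_command_sequence(commands: list[str], expected: list[str]) -> list[int]:
--     indexes: list[int] = []
--     search_from = 0
--     for command in expected:
--         command_index = _command_index(commands, command, start=search_from)
--         indexes.append(command_index)
--         search_from = command_index + 1
--     return indexes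
-- ===== SOURCE B (Python) =====
-- def _assert_command_sequence(commands: list[str], expected: list[str]) -> list[int]:
--     indexes: list[int] = []
--     j = 0
--     for i, command in enumerate(commands):
--         if j == len(expected):
--             break
--         if command == expected[j]:
--             indexes.append(i)
--             j += 1
--     if j < len(expected):
--         raise AssertionError(f"expected command {expected[j]!r} in order, got {commands!r}")
--     return indexes
-- ===== Notes on version B (the rewrite author's own statement) =====
-- stated objective: simpler
-- what changed: Replaced the outer loop over expected plus a restarting index-search helper by a single two-pointer forward walk over commands holding a pointer into expected.
import Mathlib
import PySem

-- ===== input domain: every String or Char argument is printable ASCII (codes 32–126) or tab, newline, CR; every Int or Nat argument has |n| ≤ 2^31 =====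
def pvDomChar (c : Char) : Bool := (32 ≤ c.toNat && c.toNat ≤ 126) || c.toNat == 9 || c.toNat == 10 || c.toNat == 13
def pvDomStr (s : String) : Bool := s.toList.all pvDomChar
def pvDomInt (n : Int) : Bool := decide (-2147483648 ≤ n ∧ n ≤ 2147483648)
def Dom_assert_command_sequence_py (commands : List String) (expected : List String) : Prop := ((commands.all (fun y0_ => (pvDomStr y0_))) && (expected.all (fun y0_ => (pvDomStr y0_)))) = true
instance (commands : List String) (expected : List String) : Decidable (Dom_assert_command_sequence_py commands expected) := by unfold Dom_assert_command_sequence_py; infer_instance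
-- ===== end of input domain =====

-- B replaces A's outer loop over `expected` (with a restarting index-search helper)
-- by a single two-pointer walk over `commands`; return values proved equal on Pre_
-- (where A returns instead of raising AssertionError).

-- ===== PORT A =====
-- _command_index: scan indices start.. of commands; none = the AssertionError raise
def pvCommandIndexGo (expected : String) : List String → Nat → Option Nat
  | [], _ => none
  | c :: cs, i => if c = expected then some i else pvCommandIndexGo expected cs (i + 1)

def pvCommandIndex (commands : List String) (expected : String) (start : Nat) : Option Nat :=
  pvCommandIndexGo expected (commands.drop start) start

-- the for-loop over expected, accumulating indexes and search_from
def pvAssertSeqGo (commands : List String) : List String → Nat → List Int → List Int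
  | [], _, acc => acc
  | e :: es, s, acc =>
    match pvCommandIndex commands e s with
    | none => acc  -- AssertionError path: excluded by Pre_
    | some idx => pvAssertSeqGo commands es (idx + 1) (acc ++ [(idx : Int)])

def assert_command_sequence_py (commands : List String) (expected : List String) : List Int :=
  pvAssertSeqGo commands expected 0 []

-- ===== PORT B =====
-- one forward walk over commands carrying the not-yet-matched suffix of expected
def pvWalk : List String → Nat → List String → List Int
  | _, _, [] => []
  | [], _, _ :: _ => []  -- AssertionError path: excluded by Pre_
  | c :: cs, i, e :: es =>
    if c = e then (i : Int) :: pvWalk cs (i + 1) es else pvWalk cs (i + 1) (e :: es)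

def assert_command_sequence_py_alt (commands : List String) (expected : List String) : List Int :=
  pvWalk commands 0 expected

-- ===== PRECONDITION & SPEC =====
-- A raises AssertionError exactly when expected is not a subsequence of commands; Pre_ excludes those inputs.
def Pre_assert_command_sequence_py (commands : List String) (expected : List String) : Prop :=
  expected.Sublist commands
instance (commands : List String) (expected : List String) : Decidable (Pre_assert_command_sequence_py commands expected) := by unfold Pre_assert_command_sequence_py; infer_instance
def pvWitness_assert_command_sequence_py : List String × List String := (["a", "b", "a"], ["b", "a"])

def Spec_assert_command_sequence_py (commands : List String) (expected : List String) (out : List Int) : Prop := out = assert_command_sequence_py_alt commands expected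
instance (commands : List String) (expected : List String) (out : List Int) : Decidable (Spec_assert_command_sequence_py commands expected out) := by unfold Spec_assert_command_sequence_py; infer_instance

-- ===== CLAIM (what is proved, stated in full; the proofs are below) =====
def Claim_equal_assert_command_sequence_py : Prop := ∀ (commands : List String) (expected : List String), Dom_assert_command_sequence_py commands expected → Pre_assert_command_sequence_py commands expected → Spec_assert_command_sequence_py commands expected (assert_command_sequence_py commands expected)

-- ===== LEMMAS AND PROOFS =====

lemma pv_sublist_of_ne {e c : String} {es cs : List String}
    (h : (e :: es).Sublist (c :: cs)) (hne : c ≠ e) : (e :: es).Sublist cs := by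
  cases h with
  | cons _ h' => exact h'
  | cons₂ h' => exact absurd rfl hne

lemma pv_main (commands : List String) :
    ∀ cs s es acc, cs = commands.drop s → es.Sublist cs →
      pvAssertSeqGo commands es s acc = acc ++ pvWalk cs s es := by
  intro cs
  induction cs with
  | nil =>
    intro s es acc _ hsub
    have : es = [] := List.sublist_nil.mp hsub
    subst this
    simp [pvAssertSeqGo, pvWalk]
  | cons c cs' ih =>
    intro s es acc hdrop hsub
    have hdrop' : cs' = commands.drop (s + 1) := by
      have : commands.drop (s + 1) = (commands.drop s).drop 1 := by
        rw [List.drop_drop]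
      rw [this, ← hdrop]
      rfl
    cases es with
    | nil => simp [pvAssertSeqGo, pvWalk]
    | cons e es' =>
      by_cases hce : c = e
      · subst hce
        have hsub' : es'.Sublist cs' := (List.cons_sublist_cons).mp hsub
        have hidx : pvCommandIndex commands c s = some s := by
          simp [pvCommandIndex, ← hdrop, pvCommandIndexGo]
        simp only [pvAssertSeqGo, hidx, pvWalk]
        rw [ih (s + 1) es' (acc ++ [(s : Int)]) hdrop' hsub']
        simp
      · have hsub' : (e :: es').Sublist cs' := pv_sublist_of_ne hsub hce
        have hidx : pvCommandIndex commands e s = pvCommandIndex commands e (s + 1) := by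
          simp [pvCommandIndex, ← hdrop, ← hdrop', pvCommandIndexGo, hce]
        have hA : pvAssertSeqGo commands (e :: es') s acc
            = pvAssertSeqGo commands (e :: es') (s + 1) acc := by
          simp only [pvAssertSeqGo, hidx]
        rw [hA, ih (s + 1) (e :: es') acc hdrop' hsub']
        simp [pvWalk, hce]

-- ===== VERDICT (by name: the statement is the Claim_ definition above) =====
theorem assert_command_sequence_py_spec : Claim_equal_assert_command_sequence_py := by
  intro commands expected _ hpre
  unfold Spec_assert_command_sequence_py assert_command_sequence_py assert_command_sequence_py_alt
  exact pv_main commands commands 0 expected [] rfl hpre
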